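-- pv_equiv track=rewrite | github.com/YuriGardinazzi/Information-Retrieval-Project | tests/test_pages_cleaner.py | findSquareBrackets
-- ===== SOURCE A (Python) =====
-- def findSquareBrackets(line):
--     i = 0
--     start = -1
--     end = -1
--     char = '['
--     flag = False
--
--     while(i + 1 < len(line) and flag == False):
--         if(line[i] == char and line[i + 1] == char):
--             if char == '[':
--                 start = i
--                 char = ']'
--             else:
--                 end = i + 1
--                 flag = True
--
--         i += 1
--
--     return start, end
-- ===== SOURCE B (Python) =====
-- def findSquareBrackets(line):
--     start = line.find('[[')
--     if start == -1:
--         return -1, -1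
--     end = line.find(']]', start + 1)
--     if end == -1:
--         return start, -1
--     return start, end + 1
-- ===== Notes on version B (the rewrite author's own statement) =====
-- stated objective: idiomatic
-- what changed: Replaces the single stateful while-loop with its toggling target character and flag by two sequential str.find searches ('[[' then ']]' from start+1) with direct index arithmetic.
import Mathlib
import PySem

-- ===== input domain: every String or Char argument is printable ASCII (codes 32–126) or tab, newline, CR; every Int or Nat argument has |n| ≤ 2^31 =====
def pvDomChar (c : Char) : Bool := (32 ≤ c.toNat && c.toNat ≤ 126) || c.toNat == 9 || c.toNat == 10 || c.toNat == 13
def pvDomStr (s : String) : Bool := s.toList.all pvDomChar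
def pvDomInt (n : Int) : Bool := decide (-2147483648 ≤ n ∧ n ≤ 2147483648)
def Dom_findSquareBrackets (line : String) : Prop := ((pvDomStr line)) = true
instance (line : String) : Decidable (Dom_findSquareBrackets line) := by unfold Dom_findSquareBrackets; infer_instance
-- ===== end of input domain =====

-- B replaces A's single stateful scan (toggling target char + flag) by two sequential
-- str.find searches; same result, same O(n) asymptotics (objective: idiomatic; the timing
-- run measured B faster by a constant factor, str.find being a C-level search).


-- ===== PORT A =====
-- the while loop of A: state i, start, end, char; flag=True is modelled by returning
def findLoop (cs : List Char) (i : Nat) (start fin : Int) (char : Char) : Int × Int :=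
  if i + 1 < cs.length then
    if cs.getD i ' ' = char ∧ cs.getD (i+1) ' ' = char then
      if char = '[' then
        findLoop cs (i+1) (Int.ofNat i) fin ']'
      else
        (start, Int.ofNat (i+1))
    else
      findLoop cs (i+1) start fin char
  else
    (start, fin)
termination_by cs.length - i

def findSquareBrackets (line : String) : Int × Int :=
  findLoop line.toList 0 (-1) (-1) '['

-- ===== PORT B =====
def findSquareBrackets_alt (line : String) : Int × Int :=
  let start := PySem.Str.find line "[["
  if start = -1 then (-1, -1)
  else
    let e := PySem.Str.findFrom line "]]" (start + 1)
    if e = -1 then (start, -1) else (start, e + 1)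

-- ===== PRECONDITION & SPEC =====
def Spec_findSquareBrackets (line : String) (out : Int × Int) : Prop := out = findSquareBrackets_alt line
instance (line : String) (out : Int × Int) : Decidable (Spec_findSquareBrackets line out) := by unfold Spec_findSquareBrackets; infer_instance

-- ===== CLAIM (what is proved, stated in full; the proofs are below) =====
def Claim_equal_findSquareBrackets : Prop := ∀ (line : String), Dom_findSquareBrackets line → Spec_findSquareBrackets line (findSquareBrackets line)

-- ===== LEMMAS AND PROOFS =====

-- a two-char pattern is a prefix of `cs.drop i` iff the two chars sit at i and i+1
theorem pair_prefix_drop (cs : List Char) (i : Nat) (a b : Char) :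
    [a, b] <+: cs.drop i ↔ (i + 1 < cs.length ∧ cs.getD i ' ' = a ∧ cs.getD (i+1) ' ' = b) := by
  constructor
  · intro h
    obtain ⟨t, ht⟩ := h
    have hlen : cs.length = i + (cs.drop i).length ∨ (cs.drop i).length = 0 := by
      by_cases hi : i ≤ cs.length
      · left; simp [List.length_drop]; omega
      · right; simp [List.length_drop]; omega
    have h2 : 2 ≤ (cs.drop i).length := by
      rw [← ht]; simp
    have hil : i + 1 < cs.length := by
      simp [List.length_drop] at h2; omega
    have ha : (cs.drop i).getD 0 ' ' = a := by rw [← ht]; rfl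
    have hb : (cs.drop i).getD 1 ' ' = b := by rw [← ht]; rfl
    refine ⟨hil, ?_, ?_⟩
    · rw [← ha]; simp [List.getD_eq_getElem?_getD, List.getElem?_drop]
    · rw [← hb]; simp [List.getD_eq_getElem?_getD, List.getElem?_drop]
  · rintro ⟨hil, ha, hb⟩
    have hdrop : cs.drop i = cs.getD i ' ' :: cs.getD (i+1) ' ' :: cs.drop (i+2) := by
      have h1 : i < cs.length := by omega
      rw [List.getD_eq_getElem _ _ h1, List.getD_eq_getElem _ _ hil]
      rw [← List.getElem_cons_drop (as := cs) (i := i) h1]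
      rw [← List.getElem_cons_drop (as := cs) (i := i+1) hil]
    rw [hdrop, ha, hb]
    exact ⟨cs.drop (i+2), rfl⟩

-- first-occurrence characterisation of Chars.find
theorem find_eq_of_first (s p : List Char) (k : Nat)
    (h1 : p <+: s.drop k) (h2 : ∀ i < k, ¬ p <+: s.drop i) :
    PySem.Chars.find s p = (k : Int) := by
  have hin : PySem.Chars.isIn p s = true := by
    rw [← PySem.Chars.exists_prefix_drop_iff_isIn]; exact ⟨k, h1⟩
  have hinf := (PySem.Chars.isIn_iff_infix p s).mp hin
  have hnn : 0 ≤ PySem.Chars.find s p := (PySem.Chars.find_nonneg_iff s p).mpr hinf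
  obtain ⟨hp, hmin⟩ := PySem.Chars.find_spec hnn
  set m := (PySem.Chars.find s p).toNat with hm
  have : m = k := by
    rcases Nat.lt_trichotomy m k with h | h | h
    · exact absurd hp (h2 m h)
    · exact h
    · exact absurd h1 (hmin k h)
  omega

-- stepping find over one char that does not begin an occurrence
theorem find_cons_step (c : Char) (rest p : List Char) (hnp : ¬ p <+: (c :: rest)) :
    PySem.Chars.find (c :: rest) p =
      (if PySem.Chars.find rest p = -1 then -1 else PySem.Chars.find rest p + 1) := by
  by_cases hf : PySem.Chars.find rest p = -1
  · simp only [hf, if_pos]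
    rw [PySem.Chars.find_eq_neg_one_iff] at hf ⊢
    intro hinf
    obtain ⟨j, hj⟩ := (PySem.Chars.exists_prefix_drop_iff_isIn p (c :: rest)).mpr
        ((PySem.Chars.isIn_iff_infix p (c :: rest)).mpr hinf)
    match j, hj with
    | 0, hj => exact hnp hj
    | (j+1), hj =>
      apply hf
      apply (PySem.Chars.isIn_iff_infix p rest).mp
      apply (PySem.Chars.exists_prefix_drop_iff_isIn p rest).mp
      exact ⟨j, by simpa using hj⟩
  · rw [if_neg hf]
    have hnn : 0 ≤ PySem.Chars.find rest p := by
      have := PySem.Chars.neg_one_le_find rest p; omega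
    obtain ⟨hp, hmin⟩ := PySem.Chars.find_spec hnn
    set m := (PySem.Chars.find rest p).toNat with hm
    have : PySem.Chars.find (c :: rest) p = ((m + 1 : Nat) : Int) := by
      apply find_eq_of_first
      · simpa using hp
      · intro i hi
        match i with
        | 0 => simpa using hnp
        | (i+1) =>
          have := hmin i (by omega)
          simpa using this
    rw [this]; omega

theorem find_pair_short (l : List Char) (a b : Char) (h : l.length < 2) :
    PySem.Chars.find l [a, b] = -1 := by
  rw [PySem.Chars.find_eq_neg_one_iff]
  intro hinf
  have := hinf.length_le
  simp at this; omega

theorem loop_phase2_aux (cs : List Char) (s : Int) :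
    ∀ n i, cs.length ≤ i + n →
      findLoop cs i s (-1) ']' =
        (s, if PySem.Chars.find (cs.drop i) [']',']'] = -1 then -1
            else (i : Int) + PySem.Chars.find (cs.drop i) [']',']'] + 1) := by
  intro n
  induction n with
  | zero =>
    intro i hn
    rw [findLoop]
    have h1 : ¬ (i + 1 < cs.length) := by omega
    have h2 : cs.drop i = [] := List.drop_eq_nil_of_le (by omega)
    simp [h1, h2, find_pair_short ([]) ']' ']' (by simp)]
  | succ n ih =>
    intro i hn
    rw [findLoop]
    by_cases h1 : i + 1 < cs.length
    · by_cases h2 : cs.getD i ' ' = ']' ∧ cs.getD (i+1) ' ' = ']'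
      · have hpre : [']',']'] <+: cs.drop i :=
          (pair_prefix_drop cs i ']' ']').mpr ⟨h1, h2.1, h2.2⟩
        have hf : PySem.Chars.find (cs.drop i) [']',']'] = (0 : Int) := by
          have := find_eq_of_first (cs.drop i) [']',']'] 0 (by simpa using hpre)
            (by intro j hj; omega)
          simpa using this
        rw [if_pos h1, if_pos h2, if_neg (by decide : ¬ (']' = '[')), hf]
        refine congrArg (Prod.mk s) ?_
        norm_num
      · have hnp : ¬ [']',']'] <+: cs.drop i := by
          intro hp
          exact h2 ⟨((pair_prefix_drop cs i ']' ']').mp hp).2.1,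
                    ((pair_prefix_drop cs i ']' ']').mp hp).2.2⟩
        have hlt : i < cs.length := by omega
        have hdrop : cs.drop i = cs[i] :: cs.drop (i+1) :=
          (List.getElem_cons_drop hlt).symm
        have hstep : PySem.Chars.find (cs.drop i) [']',']'] =
            (if PySem.Chars.find (cs.drop (i+1)) [']',']'] = -1 then -1
             else PySem.Chars.find (cs.drop (i+1)) [']',']'] + 1) := by
          rw [hdrop]
          exact find_cons_step cs[i] (cs.drop (i+1)) [']',']'] (hdrop ▸ hnp)
        rw [if_pos h1, if_neg h2, ih (i+1) (by omega), hstep]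
        by_cases hg : PySem.Chars.find (cs.drop (i+1)) [']',']'] = -1
        · simp [hg]
        · have hge : 0 ≤ PySem.Chars.find (cs.drop (i+1)) [']',']'] := by
            have := PySem.Chars.neg_one_le_find (cs.drop (i+1)) [']',']']
            omega
          rw [if_neg hg, if_neg hg, if_neg (by omega :
            ¬ (PySem.Chars.find (cs.drop (i+1)) [']',']'] + 1 = -1))]
          refine congrArg (Prod.mk s) ?_
          push_cast
          ring
    · have h2 : (cs.drop i).length < 2 := by
        simp [List.length_drop]; omega
      simp [h1, find_pair_short (cs.drop i) ']' ']' h2]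

theorem loop_phase1_aux (cs : List Char) :
    ∀ n i, cs.length ≤ i + n →
      findLoop cs i (-1) (-1) '[' =
        (if PySem.Chars.find (cs.drop i) ['[','['] = -1 then ((-1 : Int), (-1 : Int))
         else
           (((i + (PySem.Chars.find (cs.drop i) ['[','[']).toNat : Nat) : Int),
            if PySem.Chars.find
                 (cs.drop (i + (PySem.Chars.find (cs.drop i) ['[','[']).toNat + 1)) [']',']'] = -1
            then -1
            else ((i + (PySem.Chars.find (cs.drop i) ['[','[']).toNat + 1 : Nat) : Int)
                 + PySem.Chars.find
                     (cs.drop (i + (PySem.Chars.find (cs.drop i) ['[','[']).toNat + 1)) [']',']']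
                 + 1)) := by
  intro n
  induction n with
  | zero =>
    intro i hn
    rw [findLoop]
    have h1 : ¬ (i + 1 < cs.length) := by omega
    have h2 : cs.drop i = [] := List.drop_eq_nil_of_le (by omega)
    simp [h1, h2, find_pair_short ([]) '[' '[' (by simp)]
  | succ n ih =>
    intro i hn
    rw [findLoop]
    by_cases h1 : i + 1 < cs.length
    · by_cases h2 : cs.getD i ' ' = '[' ∧ cs.getD (i+1) ' ' = '['
      · have hpre : ['[','['] <+: cs.drop i :=
          (pair_prefix_drop cs i '[' '[').mpr ⟨h1, h2.1, h2.2⟩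
        have hf : PySem.Chars.find (cs.drop i) ['[','['] = (0 : Int) := by
          have := find_eq_of_first (cs.drop i) ['[','['] 0 (by simpa using hpre)
            (by intro j hj; omega)
          simpa using this
        rw [if_pos h1, if_pos h2, if_pos rfl, hf,
            loop_phase2_aux cs (Int.ofNat i) (cs.length) (i+1) (by omega)]
        simp
      · have hnp : ¬ ['[','['] <+: cs.drop i := by
          intro hp
          exact h2 ⟨((pair_prefix_drop cs i '[' '[').mp hp).2.1,
                    ((pair_prefix_drop cs i '[' '[').mp hp).2.2⟩
        have hlt : i < cs.length := by omega
        have hdrop : cs.drop i = cs[i] :: cs.drop (i+1) :=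
          (List.getElem_cons_drop hlt).symm
        have hstep : PySem.Chars.find (cs.drop i) ['[','['] =
            (if PySem.Chars.find (cs.drop (i+1)) ['[','['] = -1 then -1
             else PySem.Chars.find (cs.drop (i+1)) ['[','['] + 1) := by
          rw [hdrop]
          exact find_cons_step cs[i] (cs.drop (i+1)) ['[','['] (hdrop ▸ hnp)
        rw [if_pos h1, if_neg h2, ih (i+1) (by omega)]
        by_cases hg : PySem.Chars.find (cs.drop (i+1)) ['[','['] = -1
        · have hstep' : PySem.Chars.find (cs.drop i) ['[','['] = -1 := by
            rw [hstep, if_pos hg]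
          simp [hg, hstep']
        · have hge : 0 ≤ PySem.Chars.find (cs.drop (i+1)) ['[','['] := by
            have := PySem.Chars.neg_one_le_find (cs.drop (i+1)) ['[','[']
            omega
          have hstep' : PySem.Chars.find (cs.drop i) ['[','['] =
              PySem.Chars.find (cs.drop (i+1)) ['[','['] + 1 := by
            rw [hstep, if_neg hg]
          rw [if_neg hg, hstep', if_neg (by omega :
            ¬ (PySem.Chars.find (cs.drop (i+1)) ['[','['] + 1 = -1))]
          have hm : i + (PySem.Chars.find (cs.drop (i+1)) ['[','['] + 1).toNat
              = (i + 1) + (PySem.Chars.find (cs.drop (i+1)) ['[','[']).toNat := by omega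
          rw [hm]
    · have h2 : (cs.drop i).length < 2 := by
        simp [List.length_drop]; omega
      simp [h1, find_pair_short (cs.drop i) '[' '[' h2]

-- ===== VERDICT (by name: the statement is the Claim_ definition above) =====
theorem findSquareBrackets_spec : Claim_equal_findSquareBrackets := by
  intro line _
  show findSquareBrackets line = findSquareBrackets_alt line
  have hA := loop_phase1_aux line.toList line.toList.length 0 (by omega)
  simp only [Nat.zero_add, List.drop_zero] at hA
  have hBf : PySem.Str.find line "[[" = PySem.Chars.find line.toList ['[','['] := by
    rw [PySem.Str.find_eq]
    rfl
  by_cases hf : PySem.Chars.find line.toList ['[','['] = -1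
  · have hB : findSquareBrackets_alt line = (-1, -1) := by
      simp [findSquareBrackets_alt, hf]
    rw [findSquareBrackets, hA, if_pos hf, hB]
  · have hge : 0 ≤ PySem.Chars.find line.toList ['[','['] := by
      have := PySem.Chars.neg_one_le_find line.toList ['[','[']
      omega
    set m := (PySem.Chars.find line.toList ['[','[']).toNat with hm
    have hfm : PySem.Chars.find line.toList ['[','['] = ((m : Nat) : Int) := by omega
    have hmlen : m + 1 ≤ line.toList.length := by
      obtain ⟨hp, -⟩ := PySem.Chars.find_spec hge
      have h2 := hp.length_le
      simp only [List.length_drop, List.length_cons, List.length_nil] at h2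
      omega
    have hBe : PySem.Str.findFrom line "]]" (PySem.Str.find line "[[" + 1)
        = (if PySem.Chars.find (line.toList.drop (m+1)) [']',']'] = -1 then -1
           else ((m+1 : Nat) : Int) + PySem.Chars.find (line.toList.drop (m+1)) [']',']']) := by
      rw [PySem.Str.findFrom_eq, hBf, hfm]
      have hcast : ((m : Nat) : Int) + 1 = ((m + 1 : Nat) : Int) := by push_cast; ring
      rw [hcast]
      have := PySem.Chars.findFrom_natCast line.toList ("]]".toList) (m+1) hmlen
      simpa using this
    by_cases hg : PySem.Chars.find (line.toList.drop (m+1)) [']',']'] = -1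
    · have hB : findSquareBrackets_alt line = (((m : Nat) : Int), -1) := by
        simp only [findSquareBrackets_alt]
        rw [if_neg (by rw [hBf]; exact hf), hBe, if_pos hg, if_pos rfl, hBf, hfm]
      rw [findSquareBrackets, hA, if_neg hf, if_pos hg, hB]
    · have hgge : 0 ≤ PySem.Chars.find (line.toList.drop (m+1)) [']',']'] := by
        have := PySem.Chars.neg_one_le_find (line.toList.drop (m+1)) [']',']']
        omega
      have hne : ¬ (((m+1 : Nat) : Int) + PySem.Chars.find (line.toList.drop (m+1)) [']',']'] = -1) := by
        push_cast
        omega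
      have hB : findSquareBrackets_alt line
          = (((m : Nat) : Int),
             ((m+1 : Nat) : Int) + PySem.Chars.find (line.toList.drop (m+1)) [']',']'] + 1) := by
        simp only [findSquareBrackets_alt]
        rw [if_neg (by rw [hBf]; exact hf), hBe, if_neg hg, if_neg hne, hBf, hfm]
      rw [findSquareBrackets, hA, if_neg hf, if_neg hg, hB]
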